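-- pv_equiv track=rewrite | github.com/cherryyjuicee/pythonProject1 | main.py | print_M
-- ===== SOURCE A (Python) =====
-- def delete_Zero(m):
--     k = 0
--     a = []
--     for i in range(len(m)):
--         for j in range(len(m[i])):
--             if m[i][j] == 0:
--                 k += 1
--         if k != len(m[i]):
--             a.append(i)
--         k = 0
--     return a
--
-- def delete_Zero1(m):
--     k = 0
--     a = []
--     for i in range(len(m[1])):
--         for j in range(len(m)):
--             if m[j][i] == 0:
--                 k += 1
--         if k != len(m):
--             a.append(i)
--         k = 0
--     return a
--
-- def print_M(m):
--     a = delete_Zero(m)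
--     b = delete_Zero1(m)
--     m2 = []
--     for i in a:
--         m1 = []
--         for j in b:
--             m1.append(m[i][j])
--         m2.append(m1)
--     return m2
-- ===== SOURCE B (Python) =====
-- def print_M(m):
--     ncols = len(m[1])
--     col_nz = [False] * ncols
--     keep = []
--     for row in m:
--         if any(x != 0 for x in row):
--             keep.append(row)
--         col_nz = [nz or x != 0 for nz, x in zip(col_nz, row)]
--     return [[x for x, nz in zip(row, col_nz) if nz] for row in keep]
-- ===== Notes on version B (the rewrite author's own statement) =====
-- stated objective: simpler
-- what changed: B makes one pass over the rows, keeping each nonzero row and or-ing it into a boolean column-flag list, then filters each kept row by zipping it with the flags, instead of A's two separate index-collecting passes (row scan plus transposed column rescan) followed by a nested indexed rebuild.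
import Mathlib
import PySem

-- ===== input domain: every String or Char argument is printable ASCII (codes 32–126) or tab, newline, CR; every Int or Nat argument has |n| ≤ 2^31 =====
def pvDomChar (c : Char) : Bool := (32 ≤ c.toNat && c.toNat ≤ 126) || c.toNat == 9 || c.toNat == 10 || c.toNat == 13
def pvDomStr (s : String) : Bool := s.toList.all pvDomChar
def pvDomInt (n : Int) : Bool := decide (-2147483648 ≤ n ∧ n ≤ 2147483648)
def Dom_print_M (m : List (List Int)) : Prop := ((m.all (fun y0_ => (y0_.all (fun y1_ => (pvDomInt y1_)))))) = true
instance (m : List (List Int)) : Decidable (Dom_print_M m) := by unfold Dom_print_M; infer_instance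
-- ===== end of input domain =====

-- B removes the all-zero rows and columns in ONE pass over the rows, maintaining boolean
-- column flags, instead of A's two index-list passes (row scan + transposed column rescan);
-- objective: simpler (same asymptotic cost).

-- ===== PORT A =====
def delete_Zero (m : List (List Int)) : List Int :=
  let st := (PySem.List.pyRange 0 m.length 1).foldl
    (fun (st : Int × List Int) i =>
      let k := (PySem.List.pyRange 0 (PySem.List.pyGetD m i []).length 1).foldl
        (fun k j => if PySem.List.pyGetD (PySem.List.pyGetD m i []) j 0 = 0 then k + 1 else k) st.1
      let a := if k ≠ ((PySem.List.pyGetD m i []).length : Int) then st.2 ++ [i] else st.2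
      ((0 : Int), a)) ((0 : Int), [])
  st.2

def delete_Zero1 (m : List (List Int)) : List Int :=
  let st := (PySem.List.pyRange 0 (PySem.List.pyGetD m 1 []).length 1).foldl
    (fun (st : Int × List Int) i =>
      let k := (PySem.List.pyRange 0 m.length 1).foldl
        (fun k j => if PySem.List.pyGetD (PySem.List.pyGetD m j []) i 0 = 0 then k + 1 else k) st.1
      let a := if k ≠ (m.length : Int) then st.2 ++ [i] else st.2
      ((0 : Int), a)) ((0 : Int), [])
  st.2

def print_M (m : List (List Int)) : List (List Int) :=
  let a := delete_Zero m
  let b := delete_Zero1 m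
  a.foldl (fun m2 i =>
    m2 ++ [b.foldl (fun m1 j => m1 ++ [PySem.List.pyGetD (PySem.List.pyGetD m i []) j 0]) []]) []

-- ===== PORT B =====
def print_M_alt (m : List (List Int)) : List (List Int) :=
  let ncols := (PySem.List.pyGetD m 1 []).length
  let st := m.foldl
    (fun (st : List (List Int) × List Bool) row =>
      (if row.any (fun x => x != 0) then st.1 ++ [row] else st.1,
       (st.2.zip row).map (fun p => p.1 || p.2 != 0)))
    ([], List.replicate ncols false)
  st.1.map (fun row => ((row.zip st.2).filter (fun p => p.2)).map (fun p => p.1))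

-- ===== PRECONDITION & SPEC =====
-- Pre_ excludes exactly the inputs on which the Python A raises IndexError:
-- matrices with fewer than 2 rows (A reads len(m[1])) and matrices with a row
-- shorter than len(m[1]) (A's column scan reads m[j][i] for every i < len(m[1])).
def Pre_print_M (m : List (List Int)) : Prop :=
  2 ≤ m.length ∧ ∀ row ∈ m, (PySem.List.pyGetD m 1 []).length ≤ row.length
instance (m : List (List Int)) : Decidable (Pre_print_M m) := by unfold Pre_print_M; infer_instance
def pvWitness_print_M : List (List Int) := [[0, 1, 0], [2, 0, 0]]
def Spec_print_M (m : List (List Int)) (out : List (List Int)) : Prop := out = print_M_alt m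
instance (m : List (List Int)) (out : List (List Int)) : Decidable (Spec_print_M m out) := by unfold Spec_print_M; infer_instance

-- ===== CLAIM (what is proved, stated in full; the proofs are below) =====
def Claim_equal_print_M : Prop := ∀ (m : List (List Int)), Dom_print_M m → Pre_print_M m → Spec_print_M m (print_M m)

-- ===== LEMMAS AND PROOFS =====

-- row is kept iff it contains a nonzero; column j is kept iff some row has a nonzero there
def rowNZ (row : List Int) : Bool := row.any (fun x => x != 0)
def colNZ (m : List (List Int)) (j : Int) : Bool := m.any (fun row => PySem.List.pyGetD row j 0 != 0)
-- B's per-row update of the column flags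
def colStep (cn : List Bool) (row : List Int) : List Bool :=
  (cn.zip row).map (fun p => p.1 || p.2 != 0)

-- shape of both delete_Zero loops: k is reset to 0 each iteration, a collects the passing indices
lemma loop_char (l : List Int) (F : Int → Int → Int) (q : Int → Int → Prop)
    [∀ k i, Decidable (q k i)] (acc : List Int) :
    (l.foldl (fun (st : Int × List Int) i =>
        ((0 : Int), if q (F st.1 i) i then st.2 ++ [i] else st.2)) ((0 : Int), acc)).2
      = acc ++ l.filter (fun i => decide (q (F 0 i) i)) := by
  induction l generalizing acc with
  | nil => simp
  | cons x xs ih => simp only [List.foldl_cons, List.filter_cons]; rw [ih]; split_ifs <;> simp_all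

-- "count of elements satisfying p ≠ length" is "some element fails p"
lemma countfold_ne {α : Type} (l : List α) (p : α → Prop) [DecidablePred p] :
    (decide ((l.foldl (fun k x => if p x then k + 1 else k) (0:Int)) ≠ (l.length : Int)))
      = l.any (fun x => !(decide (p x))) := by
  have h : (l.foldl (fun k x => if p x then k + 1 else k) (0:Int))
      = (l.countP (fun x => decide (p x)) : Int) := by
    simpa using PySem.List.foldl_count_if (fun x => decide (p x)) l 0
  rw [h]
  rcases Decidable.em (l.countP (fun x => decide (p x)) = l.length) with he | he
  · simp [he]
    intro x hx
    have := (List.countP_eq_length).1 he x hx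
    simpa using this
  · have hne : ((l.countP (fun x => decide (p x)) : Int) ≠ (l.length : Int)) := by exact_mod_cast he
    rw [decide_eq_true hne]
    symm
    rw [List.any_eq_true]
    have := mt (List.countP_eq_length (p := fun x => decide (p x))).2 he
    push Not at this
    obtain ⟨x, hx, hpx⟩ := this
    exact ⟨x, hx, by simpa using hpx⟩

theorem delete_Zero_char (m : List (List Int)) :
    delete_Zero m = (PySem.List.pyRange 0 m.length 1).filter
      (fun i => rowNZ (PySem.List.pyGetD m i [])) := by
  unfold delete_Zero
  rw [loop_char (PySem.List.pyRange 0 m.length 1)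
      (fun k0 i => (PySem.List.pyRange 0 (PySem.List.pyGetD m i []).length 1).foldl
        (fun k j => if PySem.List.pyGetD (PySem.List.pyGetD m i []) j 0 = 0 then k + 1 else k) k0)
      (fun k i => k ≠ ((PySem.List.pyGetD m i []).length : Int)) []]
  rw [List.nil_append]
  apply List.filter_congr
  intro i _
  rw [PySem.List.foldl_pyRange_zero_pyGetD' (PySem.List.pyGetD m i []) 0
      (fun k x => if x = 0 then k + 1 else k) 0]
  rw [countfold_ne (PySem.List.pyGetD m i []) (fun x => x = 0)]
  simp only [rowNZ, bne]
  rfl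

theorem delete_Zero1_char (m : List (List Int)) :
    delete_Zero1 m = (PySem.List.pyRange 0 (PySem.List.pyGetD m 1 []).length 1).filter
      (fun i => colNZ m i) := by
  unfold delete_Zero1
  rw [loop_char (PySem.List.pyRange 0 (PySem.List.pyGetD m 1 []).length 1)
      (fun k0 i => (PySem.List.pyRange 0 m.length 1).foldl
        (fun k j => if PySem.List.pyGetD (PySem.List.pyGetD m j []) i 0 = 0 then k + 1 else k) k0)
      (fun k i => k ≠ ((m.length : Int))) []]
  rw [List.nil_append]
  apply List.filter_congr
  intro i _
  rw [PySem.List.foldl_pyRange_zero_pyGetD' m []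
      (fun k row => if PySem.List.pyGetD row i 0 = 0 then k + 1 else k) 0]
  rw [countfold_ne m (fun row => PySem.List.pyGetD row i 0 = 0)]
  simp only [colNZ, bne]
  rfl

theorem print_M_char (m : List (List Int)) :
    print_M m = (delete_Zero m).map (fun i => (delete_Zero1 m).map
      (fun j => PySem.List.pyGetD (PySem.List.pyGetD m i []) j 0)) := by
  unfold print_M
  rw [PySem.List.foldl_append_singleton_eq_map
      (fun i => (delete_Zero1 m).foldl
        (fun m1 j => m1 ++ [PySem.List.pyGetD (PySem.List.pyGetD m i []) j 0]) []) (delete_Zero m) []]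
  simp only [PySem.List.foldl_append_singleton_eq_map, List.nil_append]

lemma colStep_len (cn : List Bool) (row : List Int) (h : cn.length ≤ row.length) :
    (colStep cn row).length = cn.length := by
  simp [colStep]; omega

lemma colStep_getD (cn : List Bool) (row : List Int) (h : cn.length ≤ row.length)
    (j : Nat) (hj : j < cn.length) :
    (colStep cn row).getD j false = (cn.getD j false || (PySem.List.pyGetD row (j : Int) 0 != 0)) := by
  have hz : j < (cn.zip row).length := by simp; omega
  have hr : j < row.length := by omega
  rw [colStep, List.getD_eq_getElem _ _ (by simpa [colStep] using hz),
      List.getElem_map, List.getElem_zip,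
      List.getD_eq_getElem _ _ hj, PySem.List.pyGetD_natCast, List.getD_eq_getElem _ _ hr]

lemma colflags_len (m : List (List Int)) (acc : List Bool)
    (h : ∀ row ∈ m, acc.length ≤ row.length) :
    (m.foldl colStep acc).length = acc.length := by
  induction m generalizing acc with
  | nil => rfl
  | cons row t ih =>
    have h1 : acc.length ≤ row.length := h row (by simp)
    rw [List.foldl_cons, ih _ (fun r hr => by rw [colStep_len _ _ h1]; exact h r (by simp [hr])),
        colStep_len _ _ h1]

lemma colflags_getD (m : List (List Int)) (acc : List Bool)
    (h : ∀ row ∈ m, acc.length ≤ row.length) (j : Nat) (hj : j < acc.length) :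
    (m.foldl colStep acc).getD j false = (acc.getD j false || colNZ m (j : Int)) := by
  induction m generalizing acc with
  | nil => simp [colNZ]
  | cons row t ih =>
    have h1 : acc.length ≤ row.length := h row (by simp)
    rw [List.foldl_cons,
        ih _ (fun r hr => by rw [colStep_len _ _ h1]; exact h r (by simp [hr]))
          (by rw [colStep_len _ _ h1]; exact hj),
        colStep_getD _ _ h1 _ hj]
    simp [colNZ, Bool.or_assoc]

lemma zip_eq_map_range (row : List Int) (cn : List Bool) (h : cn.length ≤ row.length) :
    row.zip cn = (List.range cn.length).map (fun j => (row.getD j 0, cn.getD j false)) := by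
  apply List.ext_getElem
  · simp; omega
  · intro i h1 h2
    have hi : i < cn.length := by simpa using h2
    have hr : i < row.length := by omega
    simp [List.getElem_zip, hi, hr]

lemma range_filter_map {α β : Type} (m : List α) (d : α) (p : α → Bool) (f : α → β) :
    ((PySem.List.pyRange 0 m.length 1).filter (fun i => p (PySem.List.pyGetD m i d))).map
        (fun i => f (PySem.List.pyGetD m i d)) = (m.filter p).map f := by
  conv_rhs => rw [← PySem.List.map_pyGetD_pyRange_zero' m d]
  rw [List.filter_map, List.map_map]
  rfl

-- the kept-columns slice of one row, stated on both programs' shapes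
lemma row_eq (m : List (List Int)) (row : List Int) (cn : List Bool) (c : Nat)
    (hc : c ≤ row.length) (hcn : cn.length = c)
    (hget : ∀ j : Nat, j < c → cn.getD j false = colNZ m (j : Int)) :
    ((PySem.List.pyRange 0 (c : Int) 1).filter (fun j => colNZ m j)).map
        (fun j => PySem.List.pyGetD row j 0)
      = ((row.zip cn).filter (fun p => p.2)).map (fun p => p.1) := by
  rw [zip_eq_map_range row cn (by omega), hcn]
  rw [List.filter_map, List.map_map]
  rw [PySem.List.pyRange_one, List.filter_map, List.map_map]
  have hrange : ((c : Int) - 0).toNat = c := by omega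
  rw [hrange]
  have hp : (List.range c).filter ((fun j => colNZ m j) ∘ fun k : Nat => (0 : Int) + (k : Int))
      = (List.range c).filter ((fun p : Int × Bool => p.2) ∘ fun j => (row.getD j 0, cn.getD j false)) := by
    apply List.filter_congr
    intro k hk
    have hklt : k < c := List.mem_range.1 hk
    simp only [Function.comp_apply, zero_add]
    exact (hget k hklt).symm
  rw [hp]
  apply List.map_congr_left
  intro k _
  simp [Function.comp, PySem.List.pyGetD_natCast]

-- ===== VERDICT (by name: the statement is the Claim_ definition above) =====
theorem print_M_spec : Claim_equal_print_M := by
  intro m _ hpre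
  obtain ⟨h2, hrows⟩ := hpre
  unfold Spec_print_M
  set c := (PySem.List.pyGetD m 1 []).length with hc
  -- characterize A
  have hA : print_M m = (m.filter rowNZ).map
      (fun row => ((PySem.List.pyRange 0 (c : Int) 1).filter (fun j => colNZ m j)).map
        (fun j => PySem.List.pyGetD row j 0)) := by
    rw [print_M_char, delete_Zero_char, delete_Zero1_char]
    exact range_filter_map m [] rowNZ
      (fun row => ((PySem.List.pyRange 0 (c : Int) 1).filter (fun j => colNZ m j)).map
        (fun j => PySem.List.pyGetD row j 0))
  -- characterize B
  have hB : print_M_alt m = (m.filter rowNZ).map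
      (fun row => ((row.zip (m.foldl colStep (List.replicate c false))).filter
        (fun p => p.2)).map (fun p => p.1)) := by
    unfold print_M_alt
    simp only []
    rw [PySem.List.foldl_prod_mk
        (fun a (row : List Int) => if row.any (fun x => x != 0) then a ++ [row] else a)
        (fun cn (row : List Int) => (cn.zip row).map (fun p => p.1 || p.2 != 0))
        m [] (List.replicate c false)]
    rw [PySem.List.foldl_append_if_eq_filter (fun row : List Int => row.any (fun x => x != 0)) m []]
    rfl
  rw [hA, hB]
  have hlenrep : ∀ row ∈ m, (List.replicate c false).length ≤ row.length := by
    intro row hrow; simpa using hrows row hrow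
  have hcnlen : (m.foldl colStep (List.replicate c false)).length = c := by
    rw [colflags_len m _ hlenrep]; simp
  apply List.map_congr_left
  intro row hrow
  have hrowm : row ∈ m := List.mem_of_mem_filter hrow
  apply row_eq m row _ c (hrows row hrowm) hcnlen
  intro j hj
  rw [colflags_getD m _ hlenrep j (by simpa using hj)]
  simp [hj]
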